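-- pv_equiv track=rewrite | github.com/Kristo1702/adventofcode2025 | day 7/solution.py | calculate_amount_of_beam_splits
-- ===== SOURCE A (Python) =====
-- def calculate_amount_of_beam_splits(start_index, splitters_index):
--     beam_splits = 0
--     beam_indexes = set([start_index])
--
--     for i in range(len(splitters_index)):
--         row_splitters = splitters_index[i]
--         new_beam_indexes = set()
--
--         for j in range(len(row_splitters)):
--             splitter_index = row_splitters[j]
--             if splitter_index in beam_indexes:
--                 beam_splits += 1
--                 new_beam_indexes.add(splitter_index - 1)
--                 new_beam_indexes.add(splitter_index + 1)
--
--         for beam_index in beam_indexes: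
--             if beam_index not in row_splitters:
--                 new_beam_indexes.add(beam_index)
--
--         beam_indexes = new_beam_indexes
--
--     return beam_splits
-- ===== SOURCE B (Python) =====
-- def calculate_amount_of_beam_splits(start_index, splitters_index):
--     beam_splits = 0
--     beam_indexes = {start_index}
--
--     for row_splitters in splitters_index:
--         cnt = {}
--         for s in row_splitters:
--             cnt[s] = cnt.get(s, 0) + 1
--
--         new_beam_indexes = set()
--         for b in beam_indexes:
--             c = cnt.get(b, 0)
--             if c:
--                 beam_splits += c
--                 new_beam_indexes.add(b - 1)
--                 new_beam_indexes.add(b + 1)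
--             else:
--                 new_beam_indexes.add(b)
--         beam_indexes = new_beam_indexes
--
--     return beam_splits
-- ===== Notes on version B (the rewrite author's own statement) =====
-- stated objective: alternative
-- what changed: Per row, B builds a count dictionary of the splitter positions once and makes a single pass over the beam set (adding the multiplicity and b-1/b+1 on a hit, keeping the beam otherwise), replacing A's two inner loops: a scan of all splitter entries against the beam set plus a scan of beams with a linear 'not in row' list test.
import Mathlib
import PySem

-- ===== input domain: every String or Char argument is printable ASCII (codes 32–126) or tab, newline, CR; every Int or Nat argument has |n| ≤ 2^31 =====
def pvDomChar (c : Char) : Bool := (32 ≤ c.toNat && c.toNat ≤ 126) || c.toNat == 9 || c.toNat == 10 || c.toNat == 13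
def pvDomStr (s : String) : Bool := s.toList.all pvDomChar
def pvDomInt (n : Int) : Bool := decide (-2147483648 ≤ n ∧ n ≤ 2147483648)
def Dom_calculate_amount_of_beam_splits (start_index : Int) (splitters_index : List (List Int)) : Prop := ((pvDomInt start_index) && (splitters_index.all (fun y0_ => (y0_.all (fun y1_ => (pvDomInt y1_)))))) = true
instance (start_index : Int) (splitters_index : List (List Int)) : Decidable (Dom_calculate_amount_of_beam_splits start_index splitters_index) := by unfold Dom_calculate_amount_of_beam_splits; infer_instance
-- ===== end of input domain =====

-- B replaces A's per-row pair of inner loops (scan of all splitter entries against the beam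
-- set, then a scan of beams with a linear 'not in row' list test) by one beam-shaped pass
-- driven by a precomputed per-row count dictionary; only the return value is claimed equal.

-- ===== PORT A =====
def calculate_amount_of_beam_splits (start_index : Int) (splitters_index : List (List Int)) : Int :=
  (splitters_index.foldl
    (fun (st : Int × PySem.Set Int) row_splitters =>
      -- first inner loop: for j in range(len(row_splitters)) …
      let p := row_splitters.foldl
        (fun (p : Int × PySem.Set Int) splitter_index =>
          if PySem.Set.contains st.2 splitter_index then
            (p.1 + 1, PySem.Set.add (PySem.Set.add p.2 (splitter_index - 1)) (splitter_index + 1))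
          else p)
        (st.1, PySem.Set.empty)
      -- second inner loop: for beam_index in beam_indexes …
      let nb := st.2.foldl
        (fun (nb : PySem.Set Int) beam_index =>
          if row_splitters.contains beam_index then nb else PySem.Set.add nb beam_index)
        p.2
      (p.1, nb))
    (0, PySem.Set.ofList [start_index])).1

-- ===== PORT B =====
def calculate_amount_of_beam_splits_alt (start_index : Int) (splitters_index : List (List Int)) : Int :=
  (splitters_index.foldl
    (fun (st : Int × PySem.Set Int) row_splitters =>
      -- cnt[s] = cnt.get(s, 0) + 1 over the row
      let cnt : PySem.Dict Int Int :=
        row_splitters.foldl (fun d s => d.modify s 0 (· + 1)) PySem.Dict.empty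
      -- single pass over the beam set
      st.2.foldl
        (fun (p : Int × PySem.Set Int) b =>
          let c := cnt.getD b 0
          if c ≠ 0 then
            (p.1 + c, PySem.Set.add (PySem.Set.add p.2 (b - 1)) (b + 1))
          else (p.1, PySem.Set.add p.2 b))
        (st.1, PySem.Set.empty))
    (0, PySem.Set.ofList [start_index])).1

-- ===== PRECONDITION & SPEC =====
def Spec_calculate_amount_of_beam_splits (start_index : Int) (splitters_index : List (List Int)) (out : Int) : Prop := out = calculate_amount_of_beam_splits_alt start_index splitters_index
instance (start_index : Int) (splitters_index : List (List Int)) (out : Int) : Decidable (Spec_calculate_amount_of_beam_splits start_index splitters_index out) := by unfold Spec_calculate_amount_of_beam_splits; infer_instance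

-- ===== CLAIM (what is proved, stated in full; the proofs are below) =====
def Claim_equal_calculate_amount_of_beam_splits : Prop := ∀ (start_index : Int) (splitters_index : List (List Int)), Dom_calculate_amount_of_beam_splits start_index splitters_index → Spec_calculate_amount_of_beam_splits start_index splitters_index (calculate_amount_of_beam_splits start_index splitters_index)

-- ===== LEMMAS AND PROOFS =====

-- proof-side names for the loop bodies of the two ports (definitionally equal to the inline lambdas)
def stepA (beams : PySem.Set Int) : Int × PySem.Set Int → Int → Int × PySem.Set Int :=
  fun p splitter_index =>
    if PySem.Set.contains beams splitter_index then
      (p.1 + 1, PySem.Set.add (PySem.Set.add p.2 (splitter_index - 1)) (splitter_index + 1))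
    else p

def stepB (row : List Int) : Int × PySem.Set Int → Int → Int × PySem.Set Int :=
  fun p b =>
    let c := (row.foldl (fun d s => d.modify s 0 (· + 1)) PySem.Dict.empty).getD b 0
    if c ≠ 0 then (p.1 + c, PySem.Set.add (PySem.Set.add p.2 (b - 1)) (b + 1))
    else (p.1, PySem.Set.add p.2 b)

def outerA : Int × PySem.Set Int → List Int → Int × PySem.Set Int :=
  fun st row =>
    let p := row.foldl (stepA st.2) (st.1, PySem.Set.empty)
    (p.1, st.2.foldl
      (fun nb b => if row.contains b then nb else PySem.Set.add nb b) p.2)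

def outerB : Int × PySem.Set Int → List Int → Int × PySem.Set Int :=
  fun st row => st.2.foldl (stepB row) (st.1, PySem.Set.empty)

theorem portA_eq (start_index : Int) (splitters_index : List (List Int)) :
    calculate_amount_of_beam_splits start_index splitters_index
      = (splitters_index.foldl outerA (0, PySem.Set.ofList [start_index])).1 := rfl

theorem portB_eq (start_index : Int) (splitters_index : List (List Int)) :
    calculate_amount_of_beam_splits_alt start_index splitters_index
      = (splitters_index.foldl outerB (0, PySem.Set.ofList [start_index])).1 := rfl

theorem stepA_pos (beams : PySem.Set Int) (p : Int × PySem.Set Int) (s : Int)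
    (h : PySem.Set.contains beams s = true) :
    stepA beams p s = (p.1 + 1, PySem.Set.add (PySem.Set.add p.2 (s - 1)) (s + 1)) := by
  simp only [stepA]
  rw [if_pos h]

theorem stepA_neg (beams : PySem.Set Int) (p : Int × PySem.Set Int) (s : Int)
    (h : ¬ PySem.Set.contains beams s = true) : stepA beams p s = p := by
  simp only [stepA]
  rw [if_neg h]

theorem stepA_fst (beams : PySem.Set Int) (row : List Int) (p : Int × PySem.Set Int) :
    (row.foldl (stepA beams) p).1
      = p.1 + (row.countP (fun s => PySem.Set.contains beams s) : Int) := by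
  induction row generalizing p with
  | nil => simp
  | cons s row ih =>
    rw [List.foldl_cons, List.countP_cons]
    by_cases h : PySem.Set.contains beams s = true
    · rw [stepA_pos beams p s h, ih, if_pos h]
      push_cast
      ring
    · rw [stepA_neg beams p s h, ih, if_neg h]
      simp

theorem stepA_mem (beams : PySem.Set Int) (row : List Int) (p : Int × PySem.Set Int) (x : Int) :
    x ∈ (row.foldl (stepA beams) p).2
      ↔ x ∈ p.2 ∨ ∃ s ∈ row, s ∈ beams ∧ (x = s - 1 ∨ x = s + 1) := by
  induction row generalizing p with
  | nil => simp
  | cons s row ih =>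
    rw [List.foldl_cons]
    by_cases h : PySem.Set.contains beams s = true
    · have hm : s ∈ beams := (PySem.Set.contains_iff beams s).mp h
      rw [stepA_pos beams p s h, ih]
      simp only [PySem.Set.mem_add, List.mem_cons]
      constructor
      · rintro (((h1 | h1) | h1) | ⟨t, ht, hb, hx⟩)
        · exact Or.inl h1
        · exact Or.inr ⟨s, Or.inl rfl, hm, Or.inl h1⟩
        · exact Or.inr ⟨s, Or.inl rfl, hm, Or.inr h1⟩
        · exact Or.inr ⟨t, Or.inr ht, hb, hx⟩
      · rintro (h1 | ⟨t, (rfl | ht), hb, hx⟩)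
        · exact Or.inl (Or.inl (Or.inl h1))
        · rcases hx with hx | hx
          · exact Or.inl (Or.inl (Or.inr hx))
          · exact Or.inl (Or.inr hx)
        · exact Or.inr ⟨t, ht, hb, hx⟩
    · have hm : s ∉ beams := fun hs => h ((PySem.Set.contains_iff beams s).mpr hs)
      rw [stepA_neg beams p s h, ih]
      simp [hm]

theorem surv_mem (row : List Int) (l : List Int) (acc : PySem.Set Int) (x : Int) :
    x ∈ l.foldl (fun nb b => if row.contains b then nb else PySem.Set.add nb b) acc
      ↔ x ∈ acc ∨ (x ∈ l ∧ x ∉ row) := by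
  induction l generalizing acc with
  | nil => simp
  | cons b l ih =>
    rw [List.foldl_cons]
    by_cases hb : b ∈ row
    · rw [if_pos (by simpa using hb), ih]
      simp only [List.mem_cons]
      constructor
      · rintro (h1 | ⟨h1, h2⟩)
        · exact Or.inl h1
        · exact Or.inr ⟨Or.inr h1, h2⟩
      · rintro (h1 | ⟨(rfl | h1), h2⟩)
        · exact Or.inl h1
        · exact absurd hb h2
        · exact Or.inr ⟨h1, h2⟩
    · rw [if_neg (by simpa using hb), ih]
      simp only [PySem.Set.mem_add, List.mem_cons]
      constructor
      · rintro ((h1 | rfl) | ⟨h1, h2⟩)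
        · exact Or.inl h1
        · exact Or.inr ⟨Or.inl rfl, hb⟩
        · exact Or.inr ⟨Or.inr h1, h2⟩
      · rintro (h1 | ⟨(rfl | h1), h2⟩)
        · exact Or.inl (Or.inl h1)
        · exact Or.inl (Or.inr rfl)
        · exact Or.inr ⟨h1, h2⟩

theorem stepB_unfold (row : List Int) (p : Int × PySem.Set Int) (b : Int) :
    stepB row p b
      = if (row.count b : Int) ≠ 0 then
          (p.1 + (row.count b : Int), PySem.Set.add (PySem.Set.add p.2 (b - 1)) (b + 1))
        else (p.1, PySem.Set.add p.2 b) := by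
  show (let c := (row.foldl (fun d s => d.modify s 0 (· + 1)) PySem.Dict.empty).getD b 0
        if c ≠ 0 then (p.1 + c, PySem.Set.add (PySem.Set.add p.2 (b - 1)) (b + 1))
        else (p.1, PySem.Set.add p.2 b)) = _
  rw [show (row.foldl (fun d s => d.modify s 0 (· + 1)) PySem.Dict.empty).getD b 0
        = (row.count b : Int) from by
      rw [← PySem.Dict.counter_eq_foldl, PySem.Dict.getD_counter]]

theorem count_ne_iff_mem (row : List Int) (b : Int) :
    (row.count b : Int) ≠ 0 ↔ b ∈ row := by
  rw [← List.count_pos_iff]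
  omega

theorem stepB_fst (row : List Int) (l : List Int) (p : Int × PySem.Set Int) :
    (l.foldl (stepB row) p).1 = p.1 + (l.map (fun b => (row.count b : Int))).sum := by
  induction l generalizing p with
  | nil => simp
  | cons b l ih =>
    rw [List.foldl_cons, stepB_unfold]
    by_cases h : (row.count b : Int) ≠ 0
    · rw [if_pos h, ih, List.map_cons, List.sum_cons]
      ring
    · rw [if_neg h, ih, List.map_cons, List.sum_cons, not_not.mp h]
      ring

theorem stepB_mem (row : List Int) (l : List Int) (p : Int × PySem.Set Int) (x : Int) :
    x ∈ (l.foldl (stepB row) p).2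
      ↔ x ∈ p.2 ∨ ∃ b ∈ l, (b ∈ row ∧ (x = b - 1 ∨ x = b + 1)) ∨ (b ∉ row ∧ x = b) := by
  induction l generalizing p with
  | nil => simp
  | cons b l ih =>
    rw [List.foldl_cons, stepB_unfold]
    by_cases h : (row.count b : Int) ≠ 0
    · have hb : b ∈ row := (count_ne_iff_mem row b).mp h
      rw [if_pos h, ih]
      simp only [PySem.Set.mem_add, List.mem_cons]
      constructor
      · rintro (((h1 | h1) | h1) | ⟨t, ht, hx⟩)
        · exact Or.inl h1
        · exact Or.inr ⟨b, Or.inl rfl, Or.inl ⟨hb, Or.inl h1⟩⟩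
        · exact Or.inr ⟨b, Or.inl rfl, Or.inl ⟨hb, Or.inr h1⟩⟩
        · exact Or.inr ⟨t, Or.inr ht, hx⟩
      · rintro (h1 | ⟨t, (rfl | ht), hx⟩)
        · exact Or.inl (Or.inl (Or.inl h1))
        · rcases hx with ⟨_, hx | hx⟩ | ⟨ht2, rfl⟩
          · exact Or.inl (Or.inl (Or.inr hx))
          · exact Or.inl (Or.inr hx)
          · exact absurd hb ht2
        · exact Or.inr ⟨t, ht, hx⟩
    · have hb : b ∉ row := fun hm => h ((count_ne_iff_mem row b).mpr hm)
      rw [if_neg h, ih]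
      simp only [PySem.Set.mem_add, List.mem_cons]
      constructor
      · rintro ((h1 | rfl) | ⟨t, ht, hx⟩)
        · exact Or.inl h1
        · exact Or.inr ⟨x, Or.inl rfl, Or.inr ⟨hb, rfl⟩⟩
        · exact Or.inr ⟨t, Or.inr ht, hx⟩
      · rintro (h1 | ⟨t, (rfl | ht), hx⟩)
        · exact Or.inl (Or.inl h1)
        · rcases hx with ⟨ht1, _⟩ | ⟨_, rfl⟩
          · exact absurd ht1 hb
          · exact Or.inl (Or.inr rfl)
        · exact Or.inr ⟨t, ht, hx⟩

theorem countP_cons_mem (row : List Int) (b : Int) (l : List Int) (hb : b ∉ l) :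
    row.countP (fun s => decide (s ∈ b :: l))
      = row.count b + row.countP (fun s => decide (s ∈ l)) := by
  induction row with
  | nil => simp
  | cons s row ih =>
    simp only [List.countP_cons, List.count_cons, List.mem_cons] at *
    rw [ih]
    by_cases hsb : s = b
    · subst hsb
      simp [hb]
      omega
    · by_cases hsl : s ∈ l
      · simp [hsb, hsl]
        omega
      · simp [hsb, hsl]

theorem sum_count_eq_countP (row : List Int) (l : List Int) (hl : l.Nodup) :
    (l.map (fun b => (row.count b : Int))).sum
      = (row.countP (fun s => decide (s ∈ l)) : Int) := by
  induction l with
  | nil => simp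
  | cons b l ih =>
    obtain ⟨hbl, hl2⟩ := List.nodup_cons.mp hl
    rw [List.map_cons, List.sum_cons, ih hl2, countP_cons_mem row b l hbl]
    push_cast
    ring

theorem nodup_stepB (row : List Int) (l : List Int) (p : Int × PySem.Set Int)
    (hp : p.2.Nodup) : (l.foldl (stepB row) p).2.Nodup := by
  induction l generalizing p with
  | nil => exact hp
  | cons b l ih =>
    rw [List.foldl_cons, stepB_unfold]
    by_cases h : (row.count b : Int) ≠ 0
    · rw [if_pos h]
      exact ih _ (PySem.Set.nodup_add _ _ (PySem.Set.nodup_add _ _ hp))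
    · rw [if_neg h]
      exact ih _ (PySem.Set.nodup_add _ _ hp)

-- the loop invariant threaded through the outer fold: equal splits counter,
-- beam sets equal as sets, B's beam set duplicate-free
theorem main_inv (rows : List (List Int)) (st1 st2 : Int × PySem.Set Int)
    (hfst : st1.1 = st2.1) (hmem : ∀ x, x ∈ st1.2 ↔ x ∈ st2.2) (h2 : st2.2.Nodup) :
    (rows.foldl outerA st1).1 = (rows.foldl outerB st2).1 := by
  induction rows generalizing st1 st2 with
  | nil => exact hfst
  | cons row rows ih =>
    rw [List.foldl_cons, List.foldl_cons]
    apply ih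
    · -- equal beam_splits after this row
      show (row.foldl (stepA st1.2) (st1.1, PySem.Set.empty)).1
        = (st2.2.foldl (stepB row) (st2.1, PySem.Set.empty)).1
      rw [stepA_fst, stepB_fst, sum_count_eq_countP row st2.2 h2, hfst]
      congr 2
      apply List.countP_congr
      intro s _
      simp only [PySem.Set.contains_iff, hmem s, decide_eq_true_eq]
    · -- same beams after this row
      intro x
      show x ∈ (outerA st1 row).2 ↔ x ∈ (outerB st2 row).2
      rw [show (outerA st1 row).2
            = st1.2.foldl (fun nb b => if row.contains b then nb else PySem.Set.add nb b)
                (row.foldl (stepA st1.2) (st1.1, PySem.Set.empty)).2 from rfl,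
          show (outerB st2 row).2 = (st2.2.foldl (stepB row) (st2.1, PySem.Set.empty)).2 from rfl,
          surv_mem, stepA_mem, stepB_mem]
      simp only [PySem.Set.empty, List.not_mem_nil, false_or]
      constructor
      · rintro (⟨s, hs, hsb, hx⟩ | ⟨hx1, hx2⟩)
        · exact ⟨s, (hmem s).mp hsb, Or.inl ⟨hs, hx⟩⟩
        · exact ⟨x, (hmem x).mp hx1, Or.inr ⟨hx2, rfl⟩⟩
      · rintro ⟨b, hb, ⟨hbr, hx⟩ | ⟨hbr, rfl⟩⟩
        · exact Or.inl ⟨b, hbr, (hmem b).mpr hb, hx⟩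
        · exact Or.inr ⟨(hmem x).mpr hb, hbr⟩
    · -- B's beam set stays duplicate-free
      exact nodup_stepB _ _ _ List.nodup_nil

-- ===== VERDICT (by name: the statement is the Claim_ definition above) =====
theorem calculate_amount_of_beam_splits_spec : Claim_equal_calculate_amount_of_beam_splits := by
  intro start_index splitters_index _
  show _ = _
  rw [portA_eq, portB_eq]
  exact main_inv splitters_index _ _ rfl (fun x => Iff.rfl) (PySem.Set.nodup_ofList _)
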